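-- pv_equiv track=rewrite | github.com/jpcardozx/arco-find | arco/adapters/csv_prospect_adapter.py | _categorize_technology
-- ===== SOURCE A (Python) =====
-- def _categorize_technology(tech_name: str) -> str:
--     """Categorize technology based on name."""
--     tech_lower = tech_name.lower()
--
--     # Analytics
--     if any(keyword in tech_lower for keyword in ['analytics', 'tracking', 'tag manager', 'pixel']):
--         return 'Analytics'
--
--     # E-commerce
--     elif any(keyword in tech_lower for keyword in ['shopify', 'woocommerce', 'magento', 'commerce']):
--         return 'E-commerce'
--
--     # Email/Marketing
--     elif any(keyword in tech_lower for keyword in ['klaviyo', 'mailchimp', 'email', 'marketing']):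
--         return 'Email Marketing'
--
--     # Payment
--     elif any(keyword in tech_lower for keyword in ['paypal', 'stripe', 'payment', 'afterpay']):
--         return 'Payment'
--
--     # Cloud/Hosting
--     elif any(keyword in tech_lower for keyword in ['aws', 'cloudflare', 'hosting', 'cdn']):
--         return 'Infrastructure'
--
--     # Social
--     elif any(keyword in tech_lower for keyword in ['facebook', 'twitter', 'social', 'instagram']):
--         return 'Social Media'
--
--     # Development
--     elif any(keyword in tech_lower for keyword in ['jquery', 'react', 'angular', 'node', 'python']):
--         return 'Development'
--
--     else:
--         return 'Other'
-- ===== SOURCE B (Python) =====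
-- _KEYWORD_RANKS = [
--     ('analytics', 0), ('tracking', 0), ('tag manager', 0), ('pixel', 0),
--     ('shopify', 1), ('woocommerce', 1), ('magento', 1), ('commerce', 1),
--     ('klaviyo', 2), ('mailchimp', 2), ('email', 2), ('marketing', 2),
--     ('paypal', 3), ('stripe', 3), ('payment', 3), ('afterpay', 3),
--     ('aws', 4), ('cloudflare', 4), ('hosting', 4), ('cdn', 4),
--     ('facebook', 5), ('twitter', 5), ('social', 5), ('instagram', 5),
--     ('jquery', 6), ('react', 6), ('angular', 6), ('node', 6), ('python', 6),
-- ]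
--
-- _CATEGORY_NAMES = ['Analytics', 'E-commerce', 'Email Marketing', 'Payment',
--                    'Infrastructure', 'Social Media', 'Development', 'Other']
--
--
-- def _categorize_technology(tech_name: str) -> str:
--     """Single left-to-right position scan (naive multi-pattern matcher):
--     at each position try every keyword as a prefix, keeping the minimum
--     category rank found; no per-category substring searches."""
--     t = tech_name.lower()
--     best = 7
--     for i in range(len(t)):
--         for kw, rank in _KEYWORD_RANKS:
--             if t.startswith(kw, i):
--                 best = min(best, rank)
--     return _CATEGORY_NAMES[best]
-- ===== Notes on version B (the rewrite author's own statement) =====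
-- stated objective: alternative
-- what changed: Replaced the if/elif cascade of per-category substring searches by a naive multi-pattern matcher: one left-to-right scan over string positions trying every keyword as a prefix, keeping the minimum category rank, then indexing a category-name array.
import Mathlib
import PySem

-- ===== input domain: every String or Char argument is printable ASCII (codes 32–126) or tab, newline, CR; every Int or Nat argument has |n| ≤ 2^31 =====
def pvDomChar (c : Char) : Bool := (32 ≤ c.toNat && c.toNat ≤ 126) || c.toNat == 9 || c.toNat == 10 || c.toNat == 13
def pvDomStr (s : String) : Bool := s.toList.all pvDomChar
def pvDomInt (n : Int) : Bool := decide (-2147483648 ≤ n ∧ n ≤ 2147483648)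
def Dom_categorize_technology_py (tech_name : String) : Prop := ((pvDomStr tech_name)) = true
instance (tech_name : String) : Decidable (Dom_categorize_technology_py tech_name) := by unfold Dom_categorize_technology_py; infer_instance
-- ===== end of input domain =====

-- B replaces A's if/elif cascade of per-category substring searches by a naive multi-pattern
-- matcher: one scan over string positions trying every keyword as a prefix, keeping the minimum
-- category rank, then indexing a category-name array (alternative algorithm, same cost).

-- ===== PORT A =====
def categorize_technology_py (tech_name : String) : String :=
  let tech_lower := PySem.Str.lower tech_name
  if ["analytics", "tracking", "tag manager", "pixel"].any (fun keyword => PySem.Str.isIn keyword tech_lower) then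
    "Analytics"
  else if ["shopify", "woocommerce", "magento", "commerce"].any (fun keyword => PySem.Str.isIn keyword tech_lower) then
    "E-commerce"
  else if ["klaviyo", "mailchimp", "email", "marketing"].any (fun keyword => PySem.Str.isIn keyword tech_lower) then
    "Email Marketing"
  else if ["paypal", "stripe", "payment", "afterpay"].any (fun keyword => PySem.Str.isIn keyword tech_lower) then
    "Payment"
  else if ["aws", "cloudflare", "hosting", "cdn"].any (fun keyword => PySem.Str.isIn keyword tech_lower) then
    "Infrastructure"
  else if ["facebook", "twitter", "social", "instagram"].any (fun keyword => PySem.Str.isIn keyword tech_lower) then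
    "Social Media"
  else if ["jquery", "react", "angular", "node", "python"].any (fun keyword => PySem.Str.isIn keyword tech_lower) then
    "Development"
  else
    "Other"

-- ===== PORT B =====
def pvKeywordRanks : List (String × Nat) :=
  [("analytics", 0), ("tracking", 0), ("tag manager", 0), ("pixel", 0),
   ("shopify", 1), ("woocommerce", 1), ("magento", 1), ("commerce", 1),
   ("klaviyo", 2), ("mailchimp", 2), ("email", 2), ("marketing", 2),
   ("paypal", 3), ("stripe", 3), ("payment", 3), ("afterpay", 3),
   ("aws", 4), ("cloudflare", 4), ("hosting", 4), ("cdn", 4),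
   ("facebook", 5), ("twitter", 5), ("social", 5), ("instagram", 5),
   ("jquery", 6), ("react", 6), ("angular", 6), ("node", 6), ("python", 6)]

def pvCategoryNames : List String :=
  ["Analytics", "E-commerce", "Email Marketing", "Payment",
   "Infrastructure", "Social Media", "Development", "Other"]

-- t.startswith(kw, i) with 0 ≤ i < len(t) is ported exactly as a prefix test on t.toList.drop i.
def categorize_technology_py_alt (tech_name : String) : String :=
  let t := PySem.Str.lower tech_name
  let best := (List.range t.toList.length).foldl
    (fun best i => pvKeywordRanks.foldl
      (fun b kr => if PySem.Chars.startswith (t.toList.drop i) kr.1.toList then min b kr.2 else b) best) 7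
  pvCategoryNames.getD best "Other"

-- ===== PRECONDITION & SPEC =====
def Spec_categorize_technology_py (tech_name : String) (out : String) : Prop := out = categorize_technology_py_alt tech_name
instance (tech_name : String) (out : String) : Decidable (Spec_categorize_technology_py tech_name out) := by unfold Spec_categorize_technology_py; infer_instance

-- ===== CLAIM (what is proved, stated in full; the proofs are below) =====
def Claim_equal_categorize_technology_py : Prop := ∀ (tech_name : String), Dom_categorize_technology_py tech_name → Spec_categorize_technology_py tech_name (categorize_technology_py tech_name)

-- ===== LEMMAS AND PROOFS =====

-- keywords of each category, in A's order (proof helper only)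
def pvGroups : List (List String) :=
  [["analytics", "tracking", "tag manager", "pixel"],
   ["shopify", "woocommerce", "magento", "commerce"],
   ["klaviyo", "mailchimp", "email", "marketing"],
   ["paypal", "stripe", "payment", "afterpay"],
   ["aws", "cloudflare", "hosting", "cdn"],
   ["facebook", "twitter", "social", "instagram"],
   ["jquery", "react", "angular", "node", "python"]]

-- "category r matches t"
def pvD (t : List Char) (r : Nat) : Bool :=
  (pvGroups.getD r []).any (fun kw => PySem.Chars.isIn kw.toList t)

lemma pvTable_sound : ∀ kr ∈ pvKeywordRanks, kr.2 < 7 ∧ kr.1 ∈ pvGroups.getD kr.2 [] := by decide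

lemma pvTable_complete : ∀ r ∈ List.range 7, ∀ kw ∈ pvGroups.getD r [], (kw, r) ∈ pvKeywordRanks := by decide

lemma pvTable_ne_nil : ∀ kr ∈ pvKeywordRanks, kr.1.toList ≠ [] := by decide

-- characterization of the inner fold: a running minimum over the matching entries
lemma foldMin_char {α : Type} (q : α → Bool) (g : α → Nat) :
    ∀ (l : List α) (b : Nat),
      ((l.foldl (fun b a => if q a then min b (g a) else b) b ≤ b) ∧
       (∀ a ∈ l, q a = true → l.foldl (fun b a => if q a then min b (g a) else b) b ≤ g a)) ∧
      (l.foldl (fun b a => if q a then min b (g a) else b) b = b ∨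
       ∃ a ∈ l, q a = true ∧ l.foldl (fun b a => if q a then min b (g a) else b) b = g a) := by
  intro l
  induction l with
  | nil => intro b; exact ⟨⟨le_refl _, by simp⟩, Or.inl rfl⟩
  | cons x l ih =>
    intro b
    simp only [List.foldl_cons]
    obtain ⟨⟨hle, hub⟩, hcs⟩ := ih (if q x then min b (g x) else b)
    have hb' : (if q x then min b (g x) else b) ≤ b := by split <;> omega
    refine ⟨⟨hle.trans hb', ?_⟩, ?_⟩
    · intro a ha hq
      rcases List.mem_cons.mp ha with rfl | ha
      · have h2 : (if q a then min b (g a) else b) ≤ g a := by rw [hq]; simp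
        exact hle.trans h2
      · exact hub a ha hq
    · rcases hcs with h | ⟨a, ha, hq, he⟩
      · by_cases hqx : q x = true
        · rw [if_pos hqx] at h ⊢
          by_cases hm : b ≤ g x
          · exact Or.inl (by rw [h, Nat.min_eq_left hm])
          · exact Or.inr ⟨x, List.mem_cons_self .., hqx,
              by rw [h, Nat.min_eq_right (by omega)]⟩
        · rw [if_neg hqx] at h ⊢; exact Or.inl h
      · exact Or.inr ⟨a, List.mem_cons_of_mem _ ha, hq, he⟩

-- characterization of the nested fold over positions and table entries
lemma nestedFoldMin_char {α : Type} (tbl : List α) (q : Nat → α → Bool) (g : α → Nat) :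
    ∀ (is : List Nat) (b : Nat),
      ((is.foldl (fun best i => tbl.foldl (fun b a => if q i a then min b (g a) else b) best) b ≤ b) ∧
       (∀ i ∈ is, ∀ a ∈ tbl, q i a = true →
         is.foldl (fun best i => tbl.foldl (fun b a => if q i a then min b (g a) else b) best) b ≤ g a)) ∧
      (is.foldl (fun best i => tbl.foldl (fun b a => if q i a then min b (g a) else b) best) b = b ∨
       ∃ i ∈ is, ∃ a ∈ tbl, q i a = true ∧
         is.foldl (fun best i => tbl.foldl (fun b a => if q i a then min b (g a) else b) best) b = g a) := by
  intro is
  induction is with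
  | nil => intro b; exact ⟨⟨le_refl _, by simp⟩, Or.inl rfl⟩
  | cons j is ih =>
    intro b
    simp only [List.foldl_cons]
    obtain ⟨⟨hle, hub⟩, hcs⟩ := ih (tbl.foldl (fun b a => if q j a then min b (g a) else b) b)
    obtain ⟨⟨hle1, hub1⟩, hcs1⟩ := foldMin_char (q j) g tbl b
    refine ⟨⟨hle.trans hle1, ?_⟩, ?_⟩
    · intro i hi a ha hq
      rcases List.mem_cons.mp hi with rfl | hi
      · exact hle.trans (hub1 a ha hq)
      · exact hub i hi a ha hq
    · rcases hcs with h | ⟨i, hi, a, ha, hq, he⟩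
      · rcases hcs1 with h1 | ⟨a, ha, hq, he⟩
        · exact Or.inl (h.trans h1)
        · exact Or.inr ⟨j, List.mem_cons_self .., a, ha, hq, h.trans he⟩
      · exact Or.inr ⟨i, List.mem_cons_of_mem _ hi, a, ha, hq, he⟩

-- substring occurrence ↔ prefix at some scanned position (nonempty pattern)
lemma sw_iff (t kw : List Char) (hk : kw ≠ []) :
    (∃ i ∈ List.range t.length, PySem.Chars.startswith (t.drop i) kw = true) ↔
      PySem.Chars.isIn kw t = true := by
  constructor
  · rintro ⟨i, _, hsw⟩
    rw [PySem.Chars.startswith_iff] at hsw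
    exact (PySem.Chars.exists_prefix_drop_iff_isIn _ _).1 ⟨i, hsw⟩
  · intro h
    obtain ⟨j, hj⟩ := (PySem.Chars.exists_prefix_drop_iff_isIn _ _).2 h
    by_cases hjl : j < t.length
    · exact ⟨j, List.mem_range.mpr hjl, (PySem.Chars.startswith_iff _ _).2 hj⟩
    · exfalso
      rw [List.drop_eq_nil_of_le (by omega)] at hj
      exact hk (List.prefix_nil.mp hj)

-- A's if/elif chain, recast as a recursion over category ranks (proof helper only)
def pvCascade (t : List Char) (r : Nat) : String :=
  if h : r < 7 then
    (if pvD t r then pvCategoryNames.getD r "Other" else pvCascade t (r + 1))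
  else "Other"
termination_by 7 - r

lemma pvCascade_eq (t : List Char) (b : Nat)
    (hub : ∀ j < 7, pvD t j = true → b ≤ j)
    (hlb : b = 7 ∨ (b < 7 ∧ pvD t b = true)) :
    ∀ k r, r + k = 7 → r ≤ b → pvCascade t r = pvCategoryNames.getD b "Other" := by
  intro k
  induction k with
  | zero =>
    intro r h7 hrb
    have hb7 : b = 7 := by
      rcases hlb with h | ⟨h, _⟩ <;> omega
    rw [pvCascade, dif_neg (by omega), hb7]
    rfl
  | succ k ih =>
    intro r h7 hrb
    have hr7 : r < 7 := by omega
    rw [pvCascade, dif_pos hr7]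
    by_cases hd : pvD t r = true
    · have hbr : b = r := by
        have := hub r hr7 hd
        omega
      rw [if_pos hd, hbr]
    · have hne : r ≠ b := by
        rintro rfl
        rcases hlb with h | ⟨_, hdb⟩
        · omega
        · exact hd hdb
      rw [if_neg hd]
      exact ih (r + 1) (by omega) (by omega)

-- ===== VERDICT (by name: the statement is the Claim_ definition above) =====
theorem categorize_technology_py_spec : Claim_equal_categorize_technology_py := by
  intro tech_name _
  unfold Spec_categorize_technology_py categorize_technology_py categorize_technology_py_alt
  simp only []
  set tl := (PySem.Str.lower tech_name).toList with htl
  set best := (List.range tl.length).foldl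
    (fun best i => pvKeywordRanks.foldl
      (fun b kr => if PySem.Chars.startswith (tl.drop i) kr.1.toList then min b kr.2 else b) best) 7 with hbest
  obtain ⟨⟨hle7, hub⟩, hcs⟩ :=
    nestedFoldMin_char pvKeywordRanks (fun i kr => PySem.Chars.startswith (tl.drop i) kr.1.toList)
      (fun kr => kr.2) (List.range tl.length) 7
  -- upper bound: a matching category bounds best
  have hU : ∀ r < 7, pvD tl r = true → best ≤ r := by
    intro r hr hd
    obtain ⟨kw, hkw, hin⟩ := List.any_eq_true.mp hd
    obtain ⟨i, hi, hsw⟩ := (sw_iff tl kw.toList (by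
      have := pvTable_ne_nil (kw, r) (pvTable_complete r (List.mem_range.mpr hr) kw hkw)
      exact this)).2 hin
    exact hub i hi (kw, r) (pvTable_complete r (List.mem_range.mpr hr) kw hkw) hsw
  -- lower bound: best is 7 or a matching category's rank
  have hL : best = 7 ∨ (best < 7 ∧ pvD tl best = true) := by
    rcases hcs with h | ⟨i, _, kr, hkr, hq, he⟩
    · exact Or.inl h
    · obtain ⟨hlt, hmem⟩ := pvTable_sound kr hkr
      refine Or.inr ⟨by omega, ?_⟩
      have hin : PySem.Chars.isIn kr.1.toList tl = true := by
        rw [PySem.Chars.startswith_iff] at hq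
        exact (PySem.Chars.exists_prefix_drop_iff_isIn _ _).1 ⟨i, hq⟩
      rw [hbest, he]
      exact List.any_eq_true.mpr ⟨kr.1, hmem, hin⟩
  rw [← hbest] at hle7 hub hcs
  clear_value best
  trans pvCascade tl 0
  · simp [pvCascade, pvD, pvGroups, pvCategoryNames, List.any_cons, List.any_nil, htl]
  · exact pvCascade_eq tl best hU hL 7 0 rfl (Nat.zero_le _)
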